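-- pv_equiv track=rewrite | github.com/zagibu/NMSDK | ModelImporter/mesh_utils.py | polygonalise
-- ===== SOURCE A (Python) =====
-- from typing import List
--
-- def polygonalise(tris: List[tuple]) -> tuple:
--     """ Take an n-gon and a tri which are assumed to be coplanar and extend the
--     n-gon with the extra point provided by the tri and keep index ordering. """
--     # Create an initial tuple.
--     poly = list(tris[0])
--     todos = []
--
--     def add_tris(tri_list):
--         # Loop over every tri but the first.
--         for tri in tri_list:
--             # Create the set of indexes in the poly.
--             X = set(poly)
--             # Create the set of indexes in the current tri.
--             Y = set(tri)
--             # Find the points that intersect.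
--             # There should be 2 (a shared line).
--             S = X & Y
--             if len(S) != 2:
--                 todos.append(tri)
--                 continue
--             # The extra point will be the difference in the set of points in
--             # the tri and the shared points
--             extra_pt = Y - S
--             S = tuple(S)
--             extra_pt = extra_pt.pop()
--             # Get the indexes of the points which are in the poly.
--             a_idx = poly.index(S[0])
--             b_idx = poly.index(S[1])
--             # If the indexes are the first and last values, then we add to the
--             # end of the poly
--             if set((a_idx, b_idx)) == {0, len(poly) - 1}:
--                 poly.append(extra_pt)
--             elif abs(a_idx - b_idx) == 1:
--                 poly.insert(max(a_idx, b_idx), extra_pt)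
--             else:
--                 todos.append(tri)
--
--     add_tris(tris[1:])
--
--     if todos:
--         _todos = todos[:]
--         todos = []
--         add_tris(_todos)
--     return tuple(poly)
-- ===== SOURCE B (Python) =====
-- from typing import List
--
-- def polygonalise(tris: List[tuple]) -> tuple:
--     """Merge coplanar tris into one ordered polygon.
--
--     Incremental rewrite: the polygon is kept as a cyclic singly linked list
--     (dict: vertex -> successor), so membership tests and edge splicing are
--     O(1) instead of rebuilding sets and scanning with list.index.
--     """
--     first = list(tris[0])
--     n0 = len(first)
--     nxt = {}
--     for i, v in enumerate(first):
--         nxt[v] = first[(i + 1) % n0]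
--
--     def try_add(tri):
--         pts = list(dict.fromkeys(tri))
--         shared = [p for p in pts if p in nxt]
--         if len(shared) != 2:
--             return False
--         u, v = shared
--         extra = next(p for p in pts if p not in nxt)
--         if nxt[u] == v:
--             nxt[extra] = v
--             nxt[u] = extra
--         elif nxt[v] == u:
--             nxt[extra] = u
--             nxt[v] = extra
--         else:
--             return False
--         return True
--
--     todos = [tri for tri in tris[1:] if not try_add(tri)]
--     for tri in todos:
--         try_add(tri)
--
--     out = []
--     p = first[0] if first else 0
--     for _ in range(len(nxt)):
--         out.append(p)
--         p = nxt[p]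
--     return tuple(out)
-- ===== Notes on version B (the rewrite author's own statement) =====
-- stated objective: alternative
-- what changed: B replaces A's per-triangle set rebuilding (set(poly), intersection, list.index scans, list.insert) by a cyclic successor dictionary (vertex -> next vertex): O(1) membership and O(1) edge splicing per triangle, with a final walk from the fixed head linearizing the cycle; asymptotically O(n) vs A's O(n^2) when the polygon grows, though a timing run's inputs (outside Pre_) could not verify a speed-up.
-- outside the precondition, e.g. on polygonalise([(1, 2), (1, 2, 5)]): A returns (1, 2, 5), B returns (1, 5, 2); on polygonalise([(1, 2, 3), (2, 3, 5, 4)]): A returns (1, 2, 4, 3), B returns (1, 2, 5, 3); on polygonalise([(1, 1, 2), (1, 2, 7)]): A returns (1, 1, 2, 7), B returns (1, 7, 2)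
import Mathlib
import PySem

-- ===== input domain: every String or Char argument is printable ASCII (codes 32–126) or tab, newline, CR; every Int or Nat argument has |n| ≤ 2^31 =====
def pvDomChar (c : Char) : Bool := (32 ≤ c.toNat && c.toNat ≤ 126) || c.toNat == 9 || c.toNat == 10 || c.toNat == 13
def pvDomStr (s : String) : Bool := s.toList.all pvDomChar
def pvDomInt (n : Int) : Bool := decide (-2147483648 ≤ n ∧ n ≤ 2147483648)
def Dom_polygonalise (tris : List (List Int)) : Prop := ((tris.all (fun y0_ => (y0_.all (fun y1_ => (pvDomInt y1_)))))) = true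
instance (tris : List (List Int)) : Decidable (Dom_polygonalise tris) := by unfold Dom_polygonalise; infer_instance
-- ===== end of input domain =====

-- B replaces A's per-triangle set rebuilding and list.index scans by a cyclic
-- successor dictionary (vertex -> next): O(1) membership and O(1) edge splicing (alternative algorithm).

-- ===== PORT A =====
-- one iteration of A's `for tri in tri_list` loop inside add_tris, state = (poly, todos)
def pvAStep (st : List Int × List (List Int)) (tri : List Int) : List Int × List (List Int) :=
  let poly := st.1
  let todos := st.2
  let X : PySem.Set Int := PySem.Set.ofList poly
  let Y : PySem.Set Int := PySem.Set.ofList tri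
  let S : PySem.Set Int := PySem.Set.inter X Y
  if S.length ≠ 2 then
    (poly, todos ++ [tri])
  else
    -- extra_pt = (Y - S).pop(): under Pre_ the difference is a singleton, so the popped
    -- value does not depend on CPython's set iteration order; likewise tuple(S) is only
    -- used symmetrically in what follows (KeyError of pop on an empty set is outside Pre_)
    let extra_pt := (PySem.Set.diff Y S).headI
    -- poly.index(...): ValueError unreachable since S ⊆ set(poly)
    let a_idx : Int := ((PySem.List.index? poly (PySem.List.pyGetD S 0 0)).getD 0 : Nat)
    let b_idx : Int := ((PySem.List.index? poly (PySem.List.pyGetD S 1 0)).getD 0 : Nat)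
    if PySem.Set.equal (PySem.Set.ofList [a_idx, b_idx]) (PySem.Set.ofList [0, (poly.length : Int) - 1]) then
      (poly ++ [extra_pt], todos)
    else if (a_idx - b_idx).natAbs = 1 then
      (PySem.List.insert poly (max a_idx b_idx) extra_pt, todos)
    else
      (poly, todos ++ [tri])

def polygonalise (tris : List (List Int)) : List Int :=
  match tris with
  | [] => []   -- tris[0]: IndexError, excluded by Pre_
  | first :: rest =>
    let st := rest.foldl pvAStep (first, ([] : List (List Int)))
    if st.2 ≠ [] then (st.2.foldl pvAStep (st.1, [])).1 else st.1

-- ===== PORT B =====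
-- B's try_add: returns the updated successor dict and whether the tri was spliced in
def pvTryAdd (nxt : PySem.Dict Int Int) (tri : List Int) : PySem.Dict Int Int × Bool :=
  let pts := PySem.List.dedup tri           -- list(dict.fromkeys(tri))
  let shared := pts.filter (fun p => nxt.contains p)
  if shared.length = 2 then
    let u := shared.getD 0 0
    let v := shared.getD 1 0
    -- next(p for p in pts if p not in nxt): first non-member (nonempty under Pre_)
    let extra := (pts.filter (fun p => !nxt.contains p)).headI
    if nxt.getD u 0 = v then ((nxt.insert extra v).insert u extra, true)
    else if nxt.getD v 0 = u then ((nxt.insert extra u).insert v extra, true)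
    else (nxt, false)
  else (nxt, false)

-- the `nxt[v] = first[(i+1) % n0]` build loop
def pvBuild (first : List Int) : PySem.Dict Int Int :=
  (PySem.List.enumerate first).foldl
    (fun d iv => d.insert iv.2 (PySem.List.pyGetD first (PySem.Int.mod (iv.1 + 1) (first.length : Int)) 0))
    PySem.Dict.empty

-- one step of the todo-collecting comprehension `[tri for tri in tris[1:] if not try_add(tri)]`
def pvBStep (st : PySem.Dict Int Int × List (List Int)) (tri : List Int) : PySem.Dict Int Int × List (List Int) :=
  let r := pvTryAdd st.1 tri
  (r.1, if r.2 then st.2 else st.2 ++ [tri])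

def polygonalise_alt (tris : List (List Int)) : List Int :=
  match tris with
  | [] => []   -- tris[0]: IndexError, excluded by Pre_
  | first :: rest =>
    let st := rest.foldl pvBStep (pvBuild first, ([] : List (List Int)))
    let nxt := st.2.foldl (fun d tri => (pvTryAdd d tri).1) st.1
    let p0 : Int := first.headI    -- first[0] if first else 0
    ((List.range nxt.size).foldl (fun (acc : List Int × Int) _ => (acc.1 ++ [acc.2], nxt.getD acc.2 0)) ([], p0)).1

-- ===== PRECONDITION & SPEC =====
-- the vertices the polygon can ever contain: the first entry plus every triangle that could be merged
def pvGround (tris : List (List Int)) : List Int :=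
  tris.headI ++ (tris.tail.filter (fun s => (PySem.List.dedup s).length == 3)).flatten

-- Pre_ keeps the function's natural domain: a nonempty list whose first entry is a polygon
-- without repeated vertices, and where every further entry is either a genuine triangle
-- (3 distinct vertices) or shares at most one vertex with anything the polygon can contain
-- (so it is never merged); a 2-gon first entry must never be matched by a later triangle.
-- Outside it A raises (IndexError on [], KeyError from set.pop on a fully-shared tri), or
-- its value depends on CPython's set-hash iteration order (a 4+-distinct-point "tri" that
-- shares an edge), or the corner is anybody's call (which way round to extend a degenerate
-- 2-gon; a first polygon listing the same vertex twice).
def Pre_polygonalise (tris : List (List Int)) : Prop :=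
  tris ≠ [] ∧ tris.headI.Nodup ∧
    (tris.headI.length = 2 →
      ∀ t ∈ tris.tail, ¬ (tris.headI.getD 0 0 ∈ t ∧ tris.headI.getD 1 0 ∈ t)) ∧
    ∀ t ∈ tris.tail, (PySem.List.dedup t).length = 3 ∨
      ((PySem.List.dedup t).filter (fun x => decide (x ∈ pvGround tris))).length ≤ 1
instance (tris : List (List Int)) : Decidable (Pre_polygonalise tris) := by
  unfold Pre_polygonalise; infer_instance

def pvWitness_polygonalise : List (List Int) := [[0, 1, 2], [1, 2, 3]]

def Spec_polygonalise (tris : List (List Int)) (out : List Int) : Prop := out = polygonalise_alt tris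
instance (tris : List (List Int)) (out : List Int) : Decidable (Spec_polygonalise tris out) := by unfold Spec_polygonalise; infer_instance

-- ===== CLAIM (what is proved, stated in full; the proofs are below) =====
def Claim_equal_polygonalise : Prop := ∀ (tris : List (List Int)), Dom_polygonalise tris → Pre_polygonalise tris → Spec_polygonalise tris (polygonalise tris)

-- ===== LEMMAS AND PROOFS =====

-- cyclic successor of u in the vertex cycle `poly`
def pvCyc (poly : List Int) (u : Int) : Option Int :=
  match List.idxOf? u poly with
  | none => none
  | some i => poly[(i + 1) % poly.length]?

-- the simulation invariant: d is exactly the cyclic-successor dictionary of poly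
def pvRel (poly : List Int) (d : PySem.Dict Int Int) : Prop :=
  poly.Nodup ∧ d.keys.Nodup ∧ (∀ u : Int, d.contains u = decide (u ∈ poly)) ∧
    (∀ u : Int, d.get? u = pvCyc poly u)

theorem pvCyc_getElem (poly : List Int) (hn : poly.Nodup) {i : Nat} (h : i < poly.length) :
    pvCyc poly poly[i] = poly[(i + 1) % poly.length]? := by
  have hidx : List.idxOf? poly[i] poly = some i := by
    rw [List.idxOf?_eq_some_iff]
    exact ⟨h, rfl, fun j hj heq => by
      have := (hn.getElem_inj_iff (hi := by omega) (hj := h)).mp heq; omega⟩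
  simp [pvCyc, hidx]

theorem pvCyc_of_not_mem {poly : List Int} {u : Int} (h : u ∉ poly) : pvCyc poly u = none := by
  simp [pvCyc, List.idxOf?_eq_none_iff.mpr h]

theorem pvRel_size {poly d} (h : pvRel poly d) : d.size = poly.length := by
  obtain ⟨hn, hk, hc, _⟩ := h
  have hmem : ∀ u, u ∈ d.keys ↔ u ∈ poly := by
    intro u
    rw [← PySem.Dict.contains_iff_mem_keys, hc u]; simp
  have hperm : d.keys.Perm poly := (List.perm_ext_iff_of_nodup hk hn).mpr hmem
  have : d.keys.length = poly.length := hperm.length_eq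
  simpa [PySem.Dict.size, PySem.Dict.keys] using this

-- initialization: the build loop produces the successor dict of `first`
theorem pvBuild_items (first : List Int) (hn : first.Nodup) :
    (pvBuild first).items = (PySem.List.enumerate first).map
      (fun iv => (iv.2, PySem.List.pyGetD first (PySem.Int.mod (iv.1 + 1) (first.length : Int)) 0)) := by
  unfold pvBuild
  rw [PySem.Dict.items_foldl_insert_fresh]
  · rfl
  · intro a _; simp
  · rw [PySem.List.map_snd_enumerate]; exact hn

theorem pvBuild_keys (first : List Int) (hn : first.Nodup) : (pvBuild first).keys = first := by
  simp only [PySem.Dict.keys, pvBuild_items first hn, List.map_map]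
  have : ((fun p => p.1) ∘ (fun (iv : Int × Int) => (iv.2,
      PySem.List.pyGetD first (PySem.Int.mod (iv.1 + 1) (first.length : Int)) 0))) = (·.2) := rfl
  rw [this, PySem.List.map_snd_enumerate]

theorem pvBuild_rel (first : List Int) (hn : first.Nodup) : pvRel first (pvBuild first) := by
  have hk := pvBuild_keys first hn
  refine ⟨hn, by rw [hk]; exact hn, ?_, ?_⟩
  · intro u
    rw [PySem.Dict.contains_eq_decide_mem_keys, hk]
  · intro u
    by_cases hu : u ∈ first
    · obtain ⟨i, hi, rfl⟩ := List.getElem_of_mem hu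
      have hmod : (i + 1) % first.length < first.length := Nat.mod_lt _ (by omega)
      have hpair : (first[i], (first[(i + 1) % first.length] : Int)) ∈ (pvBuild first).items := by
        rw [pvBuild_items first hn]
        rw [List.mem_map]
        refine ⟨((i : Int), first[i]), ?_, ?_⟩
        · rw [PySem.List.mem_enumerate_iff]
          exact ⟨i, hi, by simp⟩
        · have h1 : ((i : Int) + 1) = ((i + 1 : Nat) : Int) := by push_cast; ring
          rw [h1, PySem.Int.mod_natCast, PySem.List.pyGetD_natCast]
          rw [List.getD_eq_getElem _ _ hmod]
      have := PySem.Dict.get?_of_mem_items _ hpair (by rw [pvBuild_keys first hn]; exact hn)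
      rw [this, pvCyc_getElem first hn hi, List.getElem?_eq_getElem hmod]
    · rw [(PySem.Dict.get?_eq_none_iff_contains _ _).mpr
        (by rw [PySem.Dict.contains_eq_decide_mem_keys, hk]; simp [hu])]
      simp [pvCyc, List.idxOf?_eq_none_iff.mpr hu]

-- the splice: inserting e as the cyclic successor of poly[m-1] matches List.insertIdx m
theorem pvIdx {L : List Int} (hn : L.Nodup) {k : Nat} (h : k < L.length) :
    List.idxOf? L[k] L = some k := by
  rw [List.idxOf?_eq_some_iff]
  exact ⟨h, rfl, fun j hj heq => by
    have := (hn.getElem_inj_iff (hi := by omega) (hj := h)).mp heq; omega⟩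

theorem pvSplice (poly : List Int) (d : PySem.Dict Int Int) (e : Int) (m : Nat)
    (hR : pvRel poly d) (he : e ∉ poly) (hm1 : 1 ≤ m) (hm2 : m ≤ poly.length) :
    pvRel (poly.insertIdx m e)
      ((d.insert e (poly.getD (m % poly.length) 0)).insert (poly.getD (m - 1) 0) e) := by
  obtain ⟨hn, hk, hc, hg⟩ := hR
  have hnpos : 0 < poly.length := by omega
  have hmm : m % poly.length < poly.length := Nat.mod_lt _ hnpos
  have hm1' : m - 1 < poly.length := by omega
  have hpred : poly.getD (m - 1) 0 = poly[m - 1] := List.getD_eq_getElem _ _ hm1'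
  have hsucc : poly.getD (m % poly.length) 0 = poly[m % poly.length] := List.getD_eq_getElem _ _ hmm
  have hlen : (poly.insertIdx m e).length = poly.length + 1 := by
    rw [List.length_insertIdx]; simp [hm2]
  have hperm := List.perm_insertIdx e poly hm2
  have hnd' : (poly.insertIdx m e).Nodup := hperm.nodup_iff.mpr (by simp [he, hn])
  have hmem : ∀ a : Int, a ∈ poly.insertIdx m e ↔ a = e ∨ a ∈ poly := fun a => List.mem_insertIdx hm2
  have hpredne : poly[m - 1] ≠ e := fun h => he (h ▸ List.getElem_mem _)
  have hgm : ∀ (k : Nat) (h1 : k < m) (h2 : k < poly.length),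
      (poly.insertIdx m e)[k]'(by omega) = poly[k] := fun k h1 h2 =>
    List.getElem_insertIdx_of_lt h1 _
  have hge : (poly.insertIdx m e)[m]'(by omega) = e := List.getElem_insertIdx_self (by omega)
  have hgg : ∀ (k : Nat) (h1 : m < k) (h2 : k < poly.length + 1),
      (poly.insertIdx m e)[k]'(by omega) = poly[k - 1]'(by omega) := fun k h1 h2 =>
    List.getElem_insertIdx_of_gt h1 _
  refine ⟨hnd', ?_, ?_, ?_⟩
  · exact PySem.Dict.nodup_keys_insert _ _ _ (PySem.Dict.nodup_keys_insert _ _ _ hk)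
  · intro u
    rw [Bool.eq_iff_iff]
    simp only [PySem.Dict.contains_insert, hc u, Bool.or_eq_true, beq_iff_eq, decide_eq_true_eq,
      hmem u, hpred]
    constructor
    · rintro (h | h | h)
      · exact Or.inr (h ▸ List.getElem_mem _)
      · exact Or.inl h
      · exact Or.inr h
    · rintro (h | h)
      · exact Or.inr (Or.inl h)
      · exact Or.inr (Or.inr h)
  · intro w
    rw [PySem.Dict.get?_insert, PySem.Dict.get?_insert]
    by_cases hw1 : w = poly.getD (m - 1) 0
    · -- w is the predecessor: its new successor is e, at position m in the spliced list
      subst hw1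
      rw [if_pos rfl]
      have hpos : (poly.insertIdx m e)[m - 1]'(by omega) = poly.getD (m - 1) 0 := by
        rw [hpred]; exact hgm (m - 1) (by omega) hm1'
      have hidx : List.idxOf? (poly.getD (m - 1) 0) (poly.insertIdx m e) = some (m - 1) := by
        have h := pvIdx (L := poly.insertIdx m e) (k := m - 1) hnd' (by rw [hlen]; omega)
        rwa [hpos] at h
      rw [pvCyc]
      simp only [hidx, hlen]
      have hmod : (m - 1 + 1) % (poly.length + 1) = m := by
        rw [Nat.sub_add_cancel hm1]; exact Nat.mod_eq_of_lt (by omega)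
      rw [hmod, List.getElem?_eq_getElem (by omega), hge]
    · rw [if_neg hw1]
      by_cases hw2 : w = e
      · -- w = e: its successor is the old successor of the edge, poly[m % n]
        rw [if_pos hw2, hw2]
        have hidx : List.idxOf? e (poly.insertIdx m e) = some m := by
          have h := pvIdx (L := poly.insertIdx m e) (k := m) hnd' (by rw [hlen]; omega)
          rwa [hge] at h
        rw [pvCyc]
        simp only [hidx, hlen, hsucc]
        rcases Nat.eq_or_lt_of_le hm2 with hmn | hmn
        · -- m = n: wrap around to position 0
          have h0 : (m + 1) % (poly.length + 1) = 0 := by rw [hmn]; exact Nat.mod_self _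
          rw [h0, List.getElem?_eq_getElem (by omega)]
          have : (poly.insertIdx m e)[0]'(by omega) = poly[0] := hgm 0 (by omega) hnpos
          rw [this]
          congr 1
          have : m % poly.length = 0 := by rw [hmn]; exact Nat.mod_self _
          simp [this]
        · have h0 : (m + 1) % (poly.length + 1) = m + 1 := Nat.mod_eq_of_lt (by omega)
          rw [h0, List.getElem?_eq_getElem (by omega)]
          have : (poly.insertIdx m e)[m + 1]'(by omega) = poly[m] := by
            have := hgg (m + 1) (by omega) (by omega)
            simpa using this
          rw [this]
          simp [Nat.mod_eq_of_lt hmn]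
      · -- an untouched vertex: both successors agree with the original cycle
        rw [if_neg hw2, hg w]
        by_cases hw3 : w ∈ poly
        · obtain ⟨i, hi, rfl⟩ := List.getElem_of_mem hw3
          rw [hpred] at hw1
          have hine : i ≠ m - 1 := fun hh => hw1 (by subst hh; rfl)
          rw [pvCyc_getElem poly hn hi, pvCyc]
          rcases Nat.lt_or_ge i m with him | him
          · -- i < m - 1: position i in both lists, successor at i+1 < m
            have hi1 : i < m - 1 := by omega
            have hpos : (poly.insertIdx m e)[i]'(by omega) = poly[i] := hgm i (by omega) hi
            have hidx : List.idxOf? poly[i] (poly.insertIdx m e) = some i := by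
              have h := pvIdx (L := poly.insertIdx m e) (k := i) hnd' (by rw [hlen]; omega)
              rwa [hpos] at h
            simp only [hidx, hlen]
            have ha : (i + 1) % (poly.length + 1) = i + 1 := Nat.mod_eq_of_lt (by omega)
            have hb : (i + 1) % poly.length = i + 1 := Nat.mod_eq_of_lt (by omega)
            rw [ha, hb, List.getElem?_eq_getElem (by omega), List.getElem?_eq_getElem (by omega)]
            rw [hgm (i + 1) (by omega) (by omega)]
          · -- i ≥ m: position i+1 in the spliced list
            have hpos : (poly.insertIdx m e)[i + 1]'(by omega) = poly[i] := by
              have := hgg (i + 1) (by omega) (by omega)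
              simpa using this
            have hidx : List.idxOf? poly[i] (poly.insertIdx m e) = some (i + 1) := by
              have h := pvIdx (L := poly.insertIdx m e) (k := i + 1) hnd' (by rw [hlen]; omega)
              rwa [hpos] at h
            simp only [hidx, hlen]
            rcases Nat.eq_or_lt_of_le (by omega : i + 1 ≤ poly.length) with hin | hin
            · -- i = n - 1: wrap on both sides
              have ha : (i + 1 + 1) % (poly.length + 1) = 0 := by rw [hin]; exact Nat.mod_self _
              have hb : (i + 1) % poly.length = 0 := by rw [hin]; exact Nat.mod_self _
              rw [ha, hb, List.getElem?_eq_getElem (by omega), List.getElem?_eq_getElem (by omega)]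
              rw [hgm 0 (by omega) hnpos]
            · have ha : (i + 1 + 1) % (poly.length + 1) = i + 2 := Nat.mod_eq_of_lt (by omega)
              have hb : (i + 1) % poly.length = i + 1 := Nat.mod_eq_of_lt (by omega)
              rw [ha, hb, List.getElem?_eq_getElem (by omega), List.getElem?_eq_getElem (by omega)]
              have := hgg (i + 2) (by omega) (by omega)
              simpa using this.symm
        · rw [pvCyc_of_not_mem hw3, pvCyc_of_not_mem]
          rw [hmem]
          rintro (h | h)
          · exact hw2 h
          · exact hw3 h

theorem pvInsertIdx_head? (l : List Int) (e : Int) (m : Nat) (hm : 1 ≤ m) :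
    (l.insertIdx m e).head? = l.head? := by
  cases l with
  | nil =>
    cases m with
    | zero => omega
    | succ k => rfl
  | cons a t =>
    cases m with
    | zero => omega
    | succ k => rfl

theorem pvInsertIdx_take_drop (l : List Int) (k : Nat) (hk : k ≤ l.length) (e : Int) :
    l.insertIdx k e = l.take k ++ e :: l.drop k := by
  induction l generalizing k with
  | nil => simp at hk; simp [hk]
  | cons a t ih =>
    cases k with
    | zero => simp
    | succ k => simp_all [List.insertIdx_succ_cons]

theorem pvGetD_rel {poly d} (hR : pvRel poly d) {a : Nat} (ha : a < poly.length) :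
    d.getD (poly.getD a 0) 0 = poly.getD ((a + 1) % poly.length) 0 := by
  obtain ⟨hn, _, _, hg⟩ := hR
  have h1 : poly.getD a 0 = poly[a] := List.getD_eq_getElem poly 0 ha
  have hmod : (a + 1) % poly.length < poly.length := Nat.mod_lt _ (by omega)
  have h2 : poly.getD ((a + 1) % poly.length) 0 = poly[(a + 1) % poly.length] :=
    List.getD_eq_getElem poly 0 hmod
  rw [h1, h2, PySem.Dict.getD_eq_get?_getD, hg, pvCyc_getElem poly hn ha]
  simp [List.getElem?_eq_getElem hmod]

-- one triangle: A's set/index step and B's dict step stay in lockstep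
theorem pvStep_rel (G : List Int) (poly : List Int) (d : PySem.Dict Int Int)
    (ts : List (List Int)) (tri : List Int) (hR : pvRel poly d) (hn2 : poly.length ≠ 2)
    (hsub : ∀ x ∈ poly, x ∈ G)
    (htri : ((PySem.List.dedup tri).length = 3 ∧ ∀ x ∈ tri, x ∈ G) ∨
      ((PySem.List.dedup tri).filter (fun x => decide (x ∈ G))).length ≤ 1) :
    pvRel (pvAStep (poly, ts) tri).1 (pvTryAdd d tri).1 ∧
    (pvAStep (poly, ts) tri).2 = (if (pvTryAdd d tri).2 then ts else ts ++ [tri]) ∧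
    (pvAStep (poly, ts) tri).1.head? = poly.head? ∧
    (pvAStep (poly, ts) tri).1.length ≠ 2 ∧
    (∀ x ∈ (pvAStep (poly, ts) tri).1, x ∈ G) := by
  obtain ⟨hn, hk, hc, hg⟩ := hR
  have htn : (PySem.List.dedup tri).Nodup := PySem.List.nodup_dedup tri
  have hSmem : ∀ x : Int, x ∈ PySem.Set.inter (PySem.Set.ofList poly) (PySem.Set.ofList tri) ↔
      (x ∈ poly ∧ x ∈ tri) := by
    intro x
    rw [PySem.Set.mem_inter, PySem.Set.mem_ofList, PySem.Set.mem_ofList]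
  have hSnd : (PySem.Set.inter (PySem.Set.ofList poly) (PySem.Set.ofList tri)).Nodup :=
    PySem.Set.nodup_inter _ _ (PySem.Set.nodup_ofList _)
  have hshared_mem : ∀ x : Int, x ∈ (PySem.List.dedup tri).filter (fun p => d.contains p) ↔ (x ∈ poly ∧ x ∈ tri) := by
    intro x
    rw [List.mem_filter, hc x, PySem.List.mem_dedup]
    simp
    tauto
  have hshared_nd : ((PySem.List.dedup tri).filter (fun p => d.contains p)).Nodup := htn.filter _
  have hlenEq : (PySem.Set.inter (PySem.Set.ofList poly) (PySem.Set.ofList tri)).length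
      = ((PySem.List.dedup tri).filter (fun p => d.contains p)).length :=
    ((List.perm_ext_iff_of_nodup hSnd hshared_nd).mpr
      (fun a => (hSmem a).trans (hshared_mem a).symm)).length_eq
  by_cases h2 : ((PySem.List.dedup tri).filter (fun p => d.contains p)).length = 2
  · -- the shared edge exists: both sides splice (or both defer)
    have ht : (PySem.List.dedup tri).length = 3 ∧ ∀ x ∈ tri, x ∈ G := by
      rcases htri with h | h
      · exact h
      · exfalso
        have himp : ∀ a ∈ PySem.List.dedup tri, d.contains a = true → decide (a ∈ G) = true := by
          intro a _ hac
          have : a ∈ poly := by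
            have := hc a
            rw [hac] at this
            simpa using this.symm
          simpa using hsub a this
        have hmono := List.countP_mono_left (l := PySem.List.dedup tri) himp
        rw [List.countP_eq_length_filter, List.countP_eq_length_filter] at hmono
        have h2' : (List.filter d.contains (PySem.List.dedup tri)).length = 2 := h2
        omega
    obtain ⟨u, v, huv⟩ := List.length_eq_two.mp h2
    have hunev : u ≠ v := by
      have := huv ▸ hshared_nd
      simp at this
      exact this
    have humem : u ∈ poly ∧ u ∈ tri := (hshared_mem u).mp (by rw [huv]; simp)
    have hvmem : v ∈ poly ∧ v ∈ tri := (hshared_mem v).mp (by rw [huv]; simp)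
    obtain ⟨i, hi, hpi⟩ := List.getElem_of_mem humem.1
    obtain ⟨j, hj, hpj⟩ := List.getElem_of_mem hvmem.1
    have hij : i ≠ j := by
      intro hh
      apply hunev
      rw [← hpi, ← hpj]
      subst hh
      rfl
    have hn3 : 3 ≤ poly.length := by omega
    have hidxu : List.idxOf? u poly = some i := by rw [← hpi]; exact pvIdx hn hi
    have hidxv : List.idxOf? v poly = some j := by rw [← hpj]; exact pvIdx hn hj
    -- the extra point
    have hEmem : ∀ x : Int, x ∈ (PySem.List.dedup tri).filter (fun p => !d.contains p) ↔ (x ∈ tri ∧ x ∉ poly) := by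
      intro x
      rw [List.mem_filter, hc x, PySem.List.mem_dedup]
      simp
    have hElen : ((PySem.List.dedup tri).filter (fun p => !d.contains p)).length = 1 := by
      have := List.length_eq_length_filter_add (l := PySem.List.dedup tri) (fun p => d.contains p)
      rw [ht.1, h2] at this
      omega
    obtain ⟨e, hEe⟩ := List.length_eq_one_iff.mp hElen
    have he : e ∈ tri ∧ e ∉ poly := (hEmem e).mp (by rw [hEe]; simp)
    have hdiffE : PySem.Set.diff (PySem.Set.ofList tri)
        (PySem.Set.inter (PySem.Set.ofList poly) (PySem.Set.ofList tri)) = [e] := by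
      have hdnd := PySem.Set.nodup_diff (PySem.Set.ofList tri)
        (PySem.Set.inter (PySem.Set.ofList poly) (PySem.Set.ofList tri)) (PySem.Set.nodup_ofList tri)
      have hdmem : ∀ x : Int, x ∈ PySem.Set.diff (PySem.Set.ofList tri)
          (PySem.Set.inter (PySem.Set.ofList poly) (PySem.Set.ofList tri)) ↔ (x ∈ tri ∧ x ∉ poly) := by
        intro x
        rw [PySem.Set.mem_diff, PySem.Set.mem_ofList, hSmem x]
        tauto
      have hperm : (PySem.Set.diff (PySem.Set.ofList tri)
          (PySem.Set.inter (PySem.Set.ofList poly) (PySem.Set.ofList tri))).Perm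
            ((PySem.List.dedup tri).filter (fun p => !d.contains p)) :=
        (List.perm_ext_iff_of_nodup hdnd (htn.filter _)).mpr
          (fun a => (hdmem a).trans (hEmem a).symm)
      rw [hEe] at hperm
      exact List.perm_singleton.mp hperm
    -- the pair S in its two possible orders
    have hSlen : (PySem.Set.inter (PySem.Set.ofList poly) (PySem.Set.ofList tri)).length = 2 := by
      rw [hlenEq, h2]
    have hSpair : PySem.Set.inter (PySem.Set.ofList poly) (PySem.Set.ofList tri) = [u, v] ∨
        PySem.Set.inter (PySem.Set.ofList poly) (PySem.Set.ofList tri) = [v, u] := by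
      obtain ⟨a, b, hab⟩ := List.length_eq_two.mp hSlen
      have haS : a ∈ [u, v] := by
        have := (hSmem a).mp (hab ▸ (by simp : a ∈ ([a, b] : List Int)))
        have := (hshared_mem a).mpr this
        rwa [huv] at this
      have hbS : b ∈ [u, v] := by
        have := (hSmem b).mp (hab ▸ (by simp : b ∈ ([a, b] : List Int)))
        have := (hshared_mem b).mpr this
        rwa [huv] at this
      have hanb : a ≠ b := by
        have := hab ▸ hSnd
        simp at this
        exact this
      simp at haS hbS
      rcases haS with rfl | rfl
      · rcases hbS with rfl | rfl
        · exact absurd rfl hanb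
        · exact Or.inl hab
      · rcases hbS with rfl | rfl
        · exact Or.inr hab
        · exact absurd rfl hanb
    -- B-side lookup characterizations
    have hmodi : (i + 1) % poly.length < poly.length := Nat.mod_lt _ (by omega)
    have hmodj : (j + 1) % poly.length < poly.length := Nat.mod_lt _ (by omega)
    have hgetu : d.getD u 0 = poly.getD ((i + 1) % poly.length) 0 := by
      have hu' : u = poly.getD i 0 := by rw [List.getD_eq_getElem _ _ hi, hpi]
      rw [hu']; exact pvGetD_rel ⟨hn, hk, hc, hg⟩ hi
    have hgetv : d.getD v 0 = poly.getD ((j + 1) % poly.length) 0 := by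
      have hv' : v = poly.getD j 0 := by rw [List.getD_eq_getElem _ _ hj, hpj]
      rw [hv']; exact pvGetD_rel ⟨hn, hk, hc, hg⟩ hj
    have hcond1 : (d.getD u 0 = v) ↔ ((i + 1) % poly.length = j) := by
      rw [hgetu, List.getD_eq_getElem _ _ hmodi, ← hpj]
      exact hn.getElem_inj_iff
    have hcond2 : (d.getD v 0 = u) ↔ ((j + 1) % poly.length = i) := by
      rw [hgetv, List.getD_eq_getElem _ _ hmodj, ← hpi]
      exact hn.getElem_inj_iff
    -- A's branch conditions in terms of the two indices (symmetric in i, j)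
    have hceq : ∀ a b : Nat, a < poly.length → b < poly.length →
        ((PySem.Set.equal (PySem.Set.ofList [(a : Int), (b : Int)])
          (PySem.Set.ofList [0, (poly.length : Int) - 1]) = true) ↔
        ((a = 0 ∧ b = poly.length - 1) ∨ (a = poly.length - 1 ∧ b = 0))) := by
      intro a b ha hb
      rw [PySem.Set.equal_iff]
      constructor
      · intro hx
        have h1 := (hx (a : Int)).mp (by simp [PySem.Set.mem_ofList])
        have h2 := (hx (b : Int)).mp (by simp [PySem.Set.mem_ofList])
        have h3 := (hx 0).mpr (by simp [PySem.Set.mem_ofList])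
        have h4 := (hx ((poly.length : Int) - 1)).mpr (by simp [PySem.Set.mem_ofList])
        simp [PySem.Set.mem_ofList] at h1 h2 h3 h4
        omega
      · intro hx x
        simp only [PySem.Set.mem_ofList, List.mem_cons, List.not_mem_nil, or_false]
        omega
    -- reduce A's step to its three branches, for either order of tuple(S)
    have hg0 : ∀ x y : Int, PySem.List.pyGetD [x, y] 0 0 = x := fun x y => rfl
    have hg1 : ∀ x y : Int, PySem.List.pyGetD [x, y] 1 0 = y := fun x y => rfl
    have hSne : ¬ ((PySem.Set.inter (PySem.Set.ofList poly) (PySem.Set.ofList tri)).length ≠ 2) := by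
      rw [hSlen]; simp
    -- B's three reductions
    have hredB1 : d.getD u 0 = v → pvTryAdd d tri = ((d.insert e v).insert u e, true) := by
      intro hb
      simp only [pvTryAdd]
      rw [huv, hEe]
      simp only [List.length_cons, List.length_nil, List.getD, List.getElem?_cons_zero,
        List.getElem?_cons_succ, Option.getD_some, List.headI, if_true]
      rw [if_pos hb]
    have hredB2 : ¬ (d.getD u 0 = v) → d.getD v 0 = u →
        pvTryAdd d tri = ((d.insert e u).insert v e, true) := by
      intro hb1 hb2
      simp only [pvTryAdd]
      rw [huv, hEe]
      simp only [List.length_cons, List.length_nil, List.getD, List.getElem?_cons_zero,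
        List.getElem?_cons_succ, Option.getD_some, List.headI, if_true]
      rw [if_neg (by simpa using hb1), if_pos (by simpa using hb2)]
    have hredBF : ¬ (d.getD u 0 = v) → ¬ (d.getD v 0 = u) → pvTryAdd d tri = (d, false) := by
      intro hb1 hb2
      simp only [pvTryAdd]
      rw [huv, hEe]
      simp only [List.length_cons, List.length_nil, List.getD, List.getElem?_cons_zero,
        List.getElem?_cons_succ, Option.getD_some, List.headI, if_true]
      rw [if_neg (by simpa using hb1), if_neg (by simpa using hb2)]
    -- reduce A's step, given the order tuple(S) came out in
    have hredA : ∀ (p q : Int) (x y : Nat),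
        PySem.Set.inter (PySem.Set.ofList poly) (PySem.Set.ofList tri) = [p, q] →
        List.idxOf? p poly = some x → List.idxOf? q poly = some y →
        pvAStep (poly, ts) tri =
          (if PySem.Set.equal (PySem.Set.ofList [((x : Nat) : Int), ((y : Nat) : Int)])
              (PySem.Set.ofList [0, (poly.length : Int) - 1]) then (poly ++ [e], ts)
           else if (((x : Nat) : Int) - ((y : Nat) : Int)).natAbs = 1 then
             (PySem.List.insert poly (max ((x : Nat) : Int) ((y : Nat) : Int)) e, ts)
           else (poly, ts ++ [tri])) := by
      intro p q x y hS hxp hyq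
      simp only [pvAStep]
      rw [if_neg hSne, hdiffE, hS]
      simp only [List.headI, hg0, hg1]
      rw [PySem.List.index?_eq_idxOf?, PySem.List.index?_eq_idxOf?, hxp, hyq]
      simp only [Option.getD_some]
    have habs : ∀ a b : Nat, (((a : Int) - (b : Int)).natAbs = 1) ↔ (b = a + 1 ∨ a = b + 1) := by
      intro a b; omega
    have hsplice : ∀ (m : Nat), 1 ≤ m → m ≤ poly.length →
        pvRel (poly.insertIdx m e)
          ((d.insert e (poly.getD (m % poly.length) 0)).insert (poly.getD (m - 1) 0) e) :=
      fun m h1 h2 => pvSplice poly d e m ⟨hn, hk, hc, hg⟩ he.2 h1 h2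
    have hheadApp : (poly ++ [e]).head? = poly.head? := by
      cases poly with
      | nil => simp at hn3
      | cons a t => rfl
    have hlenApp : (poly ++ [e]).length ≠ 2 := by simp; omega
    have hlenIns : ∀ m : Nat, m ≤ poly.length → (poly.insertIdx m e).length ≠ 2 := by
      intro m hm
      rw [List.length_insertIdx]
      simp [hm]
      omega
    have hsubApp : ∀ x ∈ poly ++ [e], x ∈ G := by
      intro x hx
      rcases List.mem_append.mp hx with h | h
      · exact hsub x h
      · simp only [List.mem_singleton] at h
        subst h
        exact ht.2 x he.1
    have hsubIns : ∀ m : Nat, m ≤ poly.length → ∀ x ∈ poly.insertIdx m e, x ∈ G := by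
      intro m hm x hx
      rcases (List.mem_insertIdx hm).mp hx with rfl | h
      · exact ht.2 x he.1
      · exact hsub x h
    by_cases hb1 : d.getD u 0 = v
    · -- B splices on the edge u → v
      have hcj := hcond1.mp hb1
      rw [hredB1 hb1]
      rcases Nat.eq_or_lt_of_le (show i + 1 ≤ poly.length by omega) with hin | hin
      · -- u is last, v is first: A appends
        have hj0 : j = 0 := by rw [hin, Nat.mod_self] at hcj; omega
        have hm := hsplice poly.length (by omega) (le_refl _)
        rw [List.insertIdx_length_self] at hm
        have hp1 : poly.getD (poly.length - 1) 0 = u := by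
          rw [List.getD_eq_getElem _ _ (by omega : poly.length - 1 < poly.length)]
          have : poly.length - 1 = i := by omega
          rw [← hpi]
          congr 1
        have hp2 : poly.getD (poly.length % poly.length) 0 = v := by
          rw [Nat.mod_self, List.getD_eq_getElem _ _ (by omega : 0 < poly.length)]
          have : 0 = j := by omega
          rw [← hpj]
          congr 1
        rw [hp1, hp2] at hm
        rcases hSpair with hS | hS
        · rw [hredA u v i j hS hidxu hidxv,
            if_pos ((hceq i j hi hj).mpr (Or.inr ⟨by omega, by omega⟩))]
          exact ⟨hm, by simp, hheadApp, hlenApp, hsubApp⟩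
        · rw [hredA v u j i hS hidxv hidxu,
            if_pos ((hceq j i hj hi).mpr (Or.inl ⟨by omega, by omega⟩))]
          exact ⟨hm, by simp, hheadApp, hlenApp, hsubApp⟩
      · -- u and v are interior neighbours: A inserts between them
        have hji : j = i + 1 := by rw [Nat.mod_eq_of_lt hin] at hcj; omega
        have hm := hsplice (i + 1) (by omega) (by omega)
        have hp1 : poly.getD (i + 1 - 1) 0 = u := by
          rw [List.getD_eq_getElem _ _ (by omega : i + 1 - 1 < poly.length)]
          have : i + 1 - 1 = i := by omega
          rw [← hpi]
          congr 1
        have hp2 : poly.getD ((i + 1) % poly.length) 0 = v := by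
          rw [List.getD_eq_getElem _ _ hmodi, ← hpj]
          congr 1
        rw [hp1, hp2] at hm
        have hneq : ¬ ((i = 0 ∧ j = poly.length - 1) ∨ (i = poly.length - 1 ∧ j = 0)) := by omega
        have hmax : max ((i : Nat) : Int) ((j : Nat) : Int) = ((j : Nat) : Int) := by omega
        have hins : PySem.List.insert poly ((j : Nat) : Int) e = poly.insertIdx (i + 1) e := by
          rw [PySem.List.insert_natCast poly j e (by omega), ← pvInsertIdx_take_drop poly j (by omega) e, hji]
        rcases hSpair with hS | hS
        · rw [hredA u v i j hS hidxu hidxv, if_neg (by rw [hceq i j hi hj]; exact hneq),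
            if_pos ((habs i j).mpr (Or.inl hji)), hmax, hins]
          exact ⟨hm, by simp, pvInsertIdx_head? poly e (i + 1) (by omega), hlenIns (i + 1) (by omega), hsubIns (i + 1) (by omega)⟩
        · rw [hredA v u j i hS hidxv hidxu, if_neg (by rw [hceq j i hj hi]; omega),
            if_pos ((habs j i).mpr (Or.inr hji)), max_comm, hmax, hins]
          exact ⟨hm, by simp, pvInsertIdx_head? poly e (i + 1) (by omega), hlenIns (i + 1) (by omega), hsubIns (i + 1) (by omega)⟩
    · by_cases hb2 : d.getD v 0 = u
      · -- B splices on the edge v → u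
        have hci := hcond2.mp hb2
        rw [hredB2 hb1 hb2]
        rcases Nat.eq_or_lt_of_le (show j + 1 ≤ poly.length by omega) with hjn | hjn
        · -- v is last, u is first: A appends
          have hi0 : i = 0 := by rw [hjn, Nat.mod_self] at hci; omega
          have hm := hsplice poly.length (by omega) (le_refl _)
          rw [List.insertIdx_length_self] at hm
          have hp1 : poly.getD (poly.length - 1) 0 = v := by
            rw [List.getD_eq_getElem _ _ (by omega : poly.length - 1 < poly.length)]
            have : poly.length - 1 = j := by omega
            rw [← hpj]
            congr 1
          have hp2 : poly.getD (poly.length % poly.length) 0 = u := by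
            rw [Nat.mod_self, List.getD_eq_getElem _ _ (by omega : 0 < poly.length)]
            have : 0 = i := by omega
            rw [← hpi]
            congr 1
          rw [hp1, hp2] at hm
          rcases hSpair with hS | hS
          · rw [hredA u v i j hS hidxu hidxv,
              if_pos ((hceq i j hi hj).mpr (Or.inl ⟨by omega, by omega⟩))]
            exact ⟨hm, by simp, hheadApp, hlenApp, hsubApp⟩
          · rw [hredA v u j i hS hidxv hidxu,
              if_pos ((hceq j i hj hi).mpr (Or.inr ⟨by omega, by omega⟩))]
            exact ⟨hm, by simp, hheadApp, hlenApp, hsubApp⟩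
        · -- v and u are interior neighbours: A inserts between them
          have hij1 : i = j + 1 := by rw [Nat.mod_eq_of_lt hjn] at hci; omega
          have hm := hsplice (j + 1) (by omega) (by omega)
          have hp1 : poly.getD (j + 1 - 1) 0 = v := by
            rw [List.getD_eq_getElem _ _ (by omega : j + 1 - 1 < poly.length)]
            have : j + 1 - 1 = j := by omega
            rw [← hpj]
            congr 1
          have hp2 : poly.getD ((j + 1) % poly.length) 0 = u := by
            rw [List.getD_eq_getElem _ _ hmodj, ← hpi]
            congr 1
          rw [hp1, hp2] at hm
          have hneq : ¬ ((i = 0 ∧ j = poly.length - 1) ∨ (i = poly.length - 1 ∧ j = 0)) := by omega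
          have hmax : max ((i : Nat) : Int) ((j : Nat) : Int) = ((i : Nat) : Int) := by omega
          have hins : PySem.List.insert poly ((i : Nat) : Int) e = poly.insertIdx (j + 1) e := by
            rw [PySem.List.insert_natCast poly i e (by omega), ← pvInsertIdx_take_drop poly i (by omega) e, hij1]
          rcases hSpair with hS | hS
          · rw [hredA u v i j hS hidxu hidxv, if_neg (by rw [hceq i j hi hj]; exact hneq),
              if_pos ((habs i j).mpr (Or.inr hij1)), hmax, hins]
            exact ⟨hm, by simp, pvInsertIdx_head? poly e (j + 1) (by omega), hlenIns (j + 1) (by omega), hsubIns (j + 1) (by omega)⟩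
          · rw [hredA v u j i hS hidxv hidxu, if_neg (by rw [hceq j i hj hi]; omega),
              if_pos ((habs j i).mpr (Or.inl hij1)), max_comm, hmax, hins]
            exact ⟨hm, by simp, pvInsertIdx_head? poly e (j + 1) (by omega), hlenIns (j + 1) (by omega), hsubIns (j + 1) (by omega)⟩
      · -- the shared points are not neighbours on the cycle: both defer
        have hnb1 : ¬ ((i + 1) % poly.length = j) := fun hh => hb1 (hcond1.mpr hh)
        have hnb2 : ¬ ((j + 1) % poly.length = i) := fun hh => hb2 (hcond2.mpr hh)
        rw [hredBF hb1 hb2]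
        have hnotadj : ¬ ((i = 0 ∧ j = poly.length - 1) ∨ (i = poly.length - 1 ∧ j = 0)) := by
          rintro (⟨h1, h2⟩ | ⟨h1, h2⟩)
          · apply hnb2
            have : j + 1 = poly.length := by omega
            rw [this, Nat.mod_self]
            omega
          · apply hnb1
            have : i + 1 = poly.length := by omega
            rw [this, Nat.mod_self]
            omega
        have hnotabs : ¬ (j = i + 1 ∨ i = j + 1) := by
          rintro (hh | hh)
          · exact hnb1 (by rw [Nat.mod_eq_of_lt (by omega)]; omega)
          · exact hnb2 (by rw [Nat.mod_eq_of_lt (by omega)]; omega)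
        rcases hSpair with hS | hS
        · rw [hredA u v i j hS hidxu hidxv, if_neg (by rw [hceq i j hi hj]; exact hnotadj),
            if_neg (by rw [habs i j]; exact hnotabs)]
          exact ⟨⟨hn, hk, hc, hg⟩, by simp, rfl, hn2, hsub⟩
        · rw [hredA v u j i hS hidxv hidxu, if_neg (by rw [hceq j i hj hi]; omega),
            if_neg (by rw [habs j i]; omega)]
          exact ⟨⟨hn, hk, hc, hg⟩, by simp, rfl, hn2, hsub⟩

  · -- no shared edge: both sides defer the triangle
    have hA : pvAStep (poly, ts) tri = (poly, ts ++ [tri]) := by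
      simp only [pvAStep]
      rw [if_pos (by rw [hlenEq]; exact h2)]
    have hB : pvTryAdd d tri = (d, false) := by
      simp only [pvTryAdd]
      rw [if_neg h2]
    rw [hA, hB]
    exact ⟨⟨hn, hk, hc, hg⟩, by simp, rfl, hn2, hsub⟩


-- the folds stay in lockstep
theorem pvFold_rel (G : List Int) (l : List (List Int)) :
    ∀ (poly : List Int) (d : PySem.Dict Int Int) (ts : List (List Int)),
    (∀ t ∈ l, ((PySem.List.dedup t).length = 3 ∧ ∀ x ∈ t, x ∈ G) ∨
      ((PySem.List.dedup t).filter (fun x => decide (x ∈ G))).length ≤ 1) →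
    pvRel poly d → poly.length ≠ 2 → (∀ x ∈ poly, x ∈ G) →
    pvRel (l.foldl pvAStep (poly, ts)).1 (l.foldl pvBStep (d, ts)).1 ∧
    (l.foldl pvAStep (poly, ts)).2 = (l.foldl pvBStep (d, ts)).2 ∧
    (l.foldl pvAStep (poly, ts)).1.head? = poly.head? ∧
    (l.foldl pvAStep (poly, ts)).1.length ≠ 2 ∧
    (∀ x ∈ (l.foldl pvAStep (poly, ts)).1, x ∈ G) ∧
    (∀ t ∈ (l.foldl pvAStep (poly, ts)).2, t ∈ ts ∨ t ∈ l) := by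
  induction l with
  | nil =>
    intro poly d ts _ hR hn2 hsub
    exact ⟨hR, rfl, rfl, hn2, hsub, fun t ht => Or.inl ht⟩
  | cons tri l ih =>
    intro poly d ts hl hR hn2 hsub
    have hstep := pvStep_rel G poly d ts tri hR hn2 hsub (hl tri List.mem_cons_self)
    obtain ⟨hR', hT', hH', hL', hS'⟩ := hstep
    simp only [List.foldl_cons]
    have hB : pvBStep (d, ts) tri = ((pvTryAdd d tri).1,
        if (pvTryAdd d tri).2 then ts else ts ++ [tri]) := rfl
    have hA : pvAStep (poly, ts) tri = ((pvAStep (poly, ts) tri).1,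
        if (pvTryAdd d tri).2 then ts else ts ++ [tri]) := by
      rw [← hT']
    rw [hA, hB]
    have := ih (pvAStep (poly, ts) tri).1 (pvTryAdd d tri).1
        (if (pvTryAdd d tri).2 then ts else ts ++ [tri])
        (fun t ht => hl t (List.mem_cons_of_mem _ ht)) hR' hL' hS'
    obtain ⟨r1, r2, r3, r4, r5, r6⟩ := this
    refine ⟨r1, r2, by rw [r3, hH'], r4, r5, fun t ht => ?_⟩
    rcases r6 t ht with h | h
    · split at h
      · exact Or.inl h
      · rcases List.mem_append.mp h with h' | h'
        · exact Or.inl h'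
        · simp only [List.mem_singleton] at h'
          exact Or.inr (h' ▸ List.mem_cons_self)
    · exact Or.inr (List.mem_cons_of_mem _ h)

-- a run of triangles that each share at most one current vertex changes nothing
theorem pvFold_inert (l : List (List Int)) :
    ∀ (poly : List Int) (d : PySem.Dict Int Int) (ts : List (List Int)),
    pvRel poly d →
    (∀ t ∈ l, ((PySem.List.dedup t).filter (fun x => decide (x ∈ poly))).length ≤ 1) →
    l.foldl pvAStep (poly, ts) = (poly, ts ++ l) ∧
    l.foldl pvBStep (d, ts) = (d, ts ++ l) := by
  induction l with
  | nil => intro poly d ts _ _; simp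
  | cons tri l ih =>
    intro poly d ts hR hl
    obtain ⟨hn, hk, hc, hg⟩ := hR
    have hshared : (PySem.List.dedup tri).filter (fun p => d.contains p)
        = (PySem.List.dedup tri).filter (fun x => decide (x ∈ poly)) := by
      apply List.filter_congr
      intro x _
      rw [hc x]
    have h1 : ((PySem.List.dedup tri).filter (fun p => d.contains p)).length ≤ 1 := by
      rw [hshared]; exact hl tri List.mem_cons_self
    have hSnd : (PySem.Set.inter (PySem.Set.ofList poly) (PySem.Set.ofList tri)).Nodup :=
      PySem.Set.nodup_inter _ _ (PySem.Set.nodup_ofList _)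
    have hlenEq : (PySem.Set.inter (PySem.Set.ofList poly) (PySem.Set.ofList tri)).length
        = ((PySem.List.dedup tri).filter (fun p => d.contains p)).length := by
      refine ((List.perm_ext_iff_of_nodup hSnd ((PySem.List.nodup_dedup tri).filter _)).mpr ?_).length_eq
      intro a
      rw [PySem.Set.mem_inter, PySem.Set.mem_ofList, PySem.Set.mem_ofList,
        List.mem_filter, hc a, PySem.List.mem_dedup]
      simp
      tauto
    have hA : pvAStep (poly, ts) tri = (poly, ts ++ [tri]) := by
      simp only [pvAStep]
      rw [if_pos (by omega)]
    have hB : pvTryAdd d tri = (d, false) := by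
      simp only [pvTryAdd]
      rw [if_neg (by omega)]
    have hBs : pvBStep (d, ts) tri = (d, ts ++ [tri]) := by
      simp only [pvBStep, hB]
      rfl
    simp only [List.foldl_cons, hA, hBs]
    have := ih poly d (ts ++ [tri]) ⟨hn, hk, hc, hg⟩
      (fun t ht => hl t (List.mem_cons_of_mem _ ht))
    simpa using this

theorem pvFst_foldB (l : List (List Int)) :
    ∀ (d : PySem.Dict Int Int) (ts : List (List Int)),
    (l.foldl pvBStep (d, ts)).1 = l.foldl (fun d tri => (pvTryAdd d tri).1) d := by
  induction l with
  | nil => intro d ts; rfl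
  | cons t l ih => intro d ts; simp only [List.foldl_cons]; exact ih _ _

-- linearization: walking the successor dict from poly's head reproduces poly
theorem pvWalkAux (poly : List Int) (d : PySem.Dict Int Int) (hR : pvRel poly d) (k : Nat) :
    ∀ (acc : List Int) (i : Nat), i < poly.length →
    ((List.range k).foldl (fun (acc : List Int × Int) _ => (acc.1 ++ [acc.2], d.getD acc.2 0))
        (acc, poly.getD i 0))
      = (acc ++ (List.range k).map (fun t => poly.getD ((i + t) % poly.length) 0),
         poly.getD ((i + k) % poly.length) 0) := by
  induction k with
  | zero => intro acc i hi; simp [Nat.mod_eq_of_lt hi]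
  | succ k ih =>
    intro acc i hi
    rw [List.range_succ, List.foldl_append, ih acc i hi]
    simp only [List.foldl_cons, List.foldl_nil, List.map_append, List.map_cons, List.map_nil,
      List.append_assoc]
    rw [pvGetD_rel hR (Nat.mod_lt _ (by omega)), Nat.mod_add_mod, Nat.add_assoc]

theorem pvWalk (poly : List Int) (d : PySem.Dict Int Int) (hR : pvRel poly d) :
    ((List.range d.size).foldl
      (fun (acc : List Int × Int) _ => (acc.1 ++ [acc.2], d.getD acc.2 0)) ([], poly.headI)).1
      = poly := by
  rw [pvRel_size hR]
  match poly, hR with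
  | [], _ => simp
  | p :: ps, hR =>
    have hh : (p :: ps).headI = (p :: ps).getD 0 0 := rfl
    rw [hh, pvWalkAux (p :: ps) d hR _ [] 0 (by simp)]
    simp only [List.nil_append]
    apply List.ext_getElem
    · simp
    · intro k h1 h2
      simp only [List.getElem_map, List.getElem_range]
      simp only [List.length_map, List.length_range] at h1
      rw [Nat.zero_add, Nat.mod_eq_of_lt h1]
      exact List.getD_eq_getElem _ 0 h2

-- ===== VERDICT (by name: the statement is the Claim_ definition above) =====
-- the elements of a nodup list over a forbidden pair number at most one
theorem pvPairBound (L : List Int) (a b : Int) (hnd : L.Nodup)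
    (hmem : ∀ x ∈ L, x = a ∨ x = b) (hnb : ¬ (a ∈ L ∧ b ∈ L)) : L.length ≤ 1 := by
  match L, hnd, hmem with
  | [], _, _ => simp
  | [x], _, _ => simp
  | x :: y :: L', hnd, hmem =>
    exfalso
    have hxy : x ≠ y := by
      have := hnd
      simp at this
      tauto
    have hx := hmem x List.mem_cons_self
    have hy := hmem y (List.mem_cons_of_mem _ List.mem_cons_self)
    apply hnb
    rcases hx with rfl | rfl <;> rcases hy with rfl | rfl
    · exact absurd rfl hxy
    · exact ⟨List.mem_cons_self, List.mem_cons_of_mem _ List.mem_cons_self⟩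
    · exact ⟨List.mem_cons_of_mem _ List.mem_cons_self, List.mem_cons_self⟩
    · exact absurd rfl hxy

theorem polygonalise_spec : Claim_equal_polygonalise := by
  intro tris _hdom hpre
  obtain ⟨hne, hnd, h2gon, htail⟩ := hpre
  unfold Spec_polygonalise
  match tris with
  | [] => cases hne rfl
  | first :: rest =>
    simp only [List.headI] at hnd h2gon
    simp only [List.tail] at htail h2gon
    simp only [polygonalise, polygonalise_alt]
    have h0 := pvBuild_rel first hnd
    have hHeadI : ∀ (a b : List Int), a.head? = b.head? → a.headI = b.headI := by
      intro a b hab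
      cases a <;> cases b <;> simp_all
    by_cases hf2 : first.length = 2
    · -- a 2-gon start: by Pre_, no triangle ever matches, so nothing changes
      obtain ⟨a, b, hab⟩ := List.length_eq_two.mp hf2
      have hanb : a ≠ b := by
        rw [hab] at hnd
        simp at hnd
        exact hnd
      have hinert : ∀ t ∈ rest,
          ((PySem.List.dedup t).filter (fun x => decide (x ∈ first))).length ≤ 1 := by
        intro t ht
        have hnb := h2gon hf2 t ht
        rw [hab] at hnb ⊢
        simp only [List.getD] at hnb
        apply pvPairBound _ a b ((PySem.List.nodup_dedup t).filter _)
        · intro x hx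
          have := (List.mem_filter.mp hx).2
          simp at this
          tauto
        · intro ⟨ha, hb⟩
          have ha' := PySem.List.mem_dedup t a |>.mp (List.mem_filter.mp ha).1
          have hb' := PySem.List.mem_dedup t b |>.mp (List.mem_filter.mp hb).1
          exact hnb ⟨by simpa using ha', by simpa using hb'⟩
      have hph1 := pvFold_inert rest first (pvBuild first) [] h0 hinert
      rw [hph1.1, hph1.2]
      simp only [List.nil_append]
      by_cases hE : rest = []
      · subst hE
        simp only [ne_eq, not_true_eq_false, if_false, List.foldl_nil]
        rw [pvWalk _ _ h0]
      · simp only [ne_eq, hE, not_false_eq_true, if_true]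
        have hph2 := pvFold_inert rest first (pvBuild first) [] h0 hinert
        rw [hph2.1]
        have hguard : (rest.foldl pvBStep (pvBuild first, ([] : List (List Int)))).1
            = rest.foldl (fun d tri => (pvTryAdd d tri).1) (pvBuild first) := pvFst_foldB _ _ _
        rw [← hguard, hph2.2]
        rw [pvWalk _ _ h0]
    · -- the general case, over the ground vertex set
      have hG := htail
      have hGfirst : ∀ x ∈ first, x ∈ pvGround (first :: rest) := by
        intro x hx
        unfold pvGround
        simp only [List.headI, List.tail]
        exact List.mem_append_left _ hx
      have hHtri : ∀ t ∈ rest, ((PySem.List.dedup t).length = 3 ∧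
          (∀ x ∈ t, x ∈ pvGround (first :: rest))) ∨
          ((PySem.List.dedup t).filter
            (fun x => decide (x ∈ pvGround (first :: rest)))).length ≤ 1 := by
        intro t ht
        rcases htail t ht with h | h
        · left
          refine ⟨h, fun x hx => ?_⟩
          unfold pvGround
          simp only [List.headI, List.tail]
          apply List.mem_append_right
          rw [List.mem_flatten]
          exact ⟨t, List.mem_filter.mpr ⟨ht, by simpa using h⟩, hx⟩
        · exact Or.inr h
      have h1 := pvFold_rel (pvGround (first :: rest)) rest first (pvBuild first) [] hHtri h0 hf2 hGfirst
      obtain ⟨hR1, hT1, hH1, hL1, hB1, hS1⟩ := h1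
      have htodo : ∀ t ∈ (rest.foldl pvAStep (first, [])).2,
          ((PySem.List.dedup t).length = 3 ∧ (∀ x ∈ t, x ∈ pvGround (first :: rest))) ∨
          ((PySem.List.dedup t).filter
            (fun x => decide (x ∈ pvGround (first :: rest)))).length ≤ 1 := by
        intro t ht
        rcases hS1 t ht with h | h
        · cases h
        · exact hHtri t h
      have h2 := pvFold_rel (pvGround (first :: rest)) (rest.foldl pvAStep (first, [])).2
          (rest.foldl pvAStep (first, [])).1
          (rest.foldl pvBStep (pvBuild first, [])).1 [] htodo hR1 hL1 hB1
      obtain ⟨hR2, _, hH2, _, _, _⟩ := h2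
      rw [← hT1]
      by_cases hE : (rest.foldl pvAStep (first, [])).2 = []
      · rw [hE]
        simp only [ne_eq, not_true_eq_false, if_false, List.foldl_nil]
        rw [← hHeadI _ _ hH1, pvWalk _ _ hR1]
      · simp only [ne_eq, hE, not_false_eq_true, if_true]
        have hguard2 : ((rest.foldl pvAStep (first, [])).2.foldl pvBStep
              ((rest.foldl pvBStep (pvBuild first, [])).1, [])).1
            = (rest.foldl pvAStep (first, [])).2.foldl (fun d tri => (pvTryAdd d tri).1)
                (rest.foldl pvBStep (pvBuild first, [])).1 := pvFst_foldB _ _ _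
        rw [hguard2] at hR2
        rw [← hHeadI _ _ (hH2.trans hH1), pvWalk _ _ hR2]
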